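-- pv_equiv track=rewrite | github.com/BeatButton/beattie | beattie/utils/etc.py | spoiler_spans
-- ===== SOURCE A (Python) =====
-- def spoiler_spans(text: str) -> list[tuple[int, int]]:
--     """Returns indices substrings in spoilers (inclusive left, exclusive right)"""
--     spans = []
--     start = 0
--     try:
--         while True:
--             left = text.index("||", start) + 2
--             right = text.index("||", left)
--             start = right + 2
--             spans.append((left, right))
--     except ValueError:
--         pass
--
--     return spans
-- ===== SOURCE B (Python) =====
-- def spoiler_spans(text: str) -> list[tuple[int, int]]:
--     """Returns indices substrings in spoilers (inclusive left, exclusive right)"""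
--     positions = []
--     pos = 0
--     while True:
--         p = text.find("||", pos)
--         if p == -1:
--             break
--         positions.append(p)
--         pos = p + 2
--     it = iter(positions)
--     return [(l + 2, r) for l, r in zip(it, it)]
-- ===== Notes on version B (the rewrite author's own statement) =====
-- stated objective: alternative
-- what changed: Replaces A's interleaved left/right index-scan that appends spans inside one loop with a two-pass decomposition: first collect all non-overlapping spoiler-marker positions (a str.find loop advancing past each two-character hit), then pair consecutive positions via zip(it, it), dropping an unpaired trailing marker.
import Mathlib
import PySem

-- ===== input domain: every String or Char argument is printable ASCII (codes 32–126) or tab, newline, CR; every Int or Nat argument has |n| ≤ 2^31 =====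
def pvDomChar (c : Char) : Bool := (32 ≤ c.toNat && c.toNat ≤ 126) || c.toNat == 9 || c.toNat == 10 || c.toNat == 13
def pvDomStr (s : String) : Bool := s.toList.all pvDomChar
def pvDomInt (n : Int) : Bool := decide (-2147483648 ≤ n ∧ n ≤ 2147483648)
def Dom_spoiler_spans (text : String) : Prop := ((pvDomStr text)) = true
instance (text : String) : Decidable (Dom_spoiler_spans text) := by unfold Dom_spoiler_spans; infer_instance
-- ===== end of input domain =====

-- B replaces A's interleaved find-left/find-right accumulator loop by collecting all
-- non-overlapping "||" positions first and then pairing them up (objective: alternative decomposition).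

-- ===== PORT A =====
-- A's `while True` loop with the ValueError break; fuel = len+1 is sufficient since
-- `start` grows by at least 2 per iteration (each "||" occupies 2 chars).
def pvLoopA (s : List Char) (fuel : Nat) (start : Int) (spans : List (Int × Int)) :
    List (Int × Int) :=
  match fuel with
  | 0 => spans
  | fuel + 1 =>
    let l := PySem.Chars.findFrom s ['|', '|'] start none
    if l = -1 then spans
    else
      let left := l + 2
      let right := PySem.Chars.findFrom s ['|', '|'] left none
      if right = -1 then spans
      else pvLoopA s fuel (right + 2) (spans ++ [(left, right)])

def spoiler_spans (text : String) : List (Int × Int) :=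
  pvLoopA text.toList (text.toList.length + 1) 0 []

-- ===== PORT B =====
-- Source B first pass: positions of non-overlapping "||", advancing by 2 past each hit;
-- fuel = 2*(len+1) is sufficient since `pos` grows by at least 2 per iteration.
def pvPositions (s : List Char) (fuel : Nat) (pos : Int) : List Int :=
  match fuel with
  | 0 => []
  | fuel + 1 =>
    let p := PySem.Chars.findFrom s ['|', '|'] pos none
    if p = -1 then []
    else p :: pvPositions s fuel (p + 2)

-- Source B second pass: the zip(it, it) comprehension pairs consecutive positions.
def pvPair : List Int → List (Int × Int)
  | l :: r :: rest => (l + 2, r) :: pvPair rest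
  | _ => []

def spoiler_spans_alt (text : String) : List (Int × Int) :=
  pvPair (pvPositions text.toList (2 * (text.toList.length + 1)) 0)

-- ===== PRECONDITION & SPEC =====
def Spec_spoiler_spans (text : String) (out : List (Int × Int)) : Prop := out = spoiler_spans_alt text
instance (text : String) (out : List (Int × Int)) : Decidable (Spec_spoiler_spans text out) := by unfold Spec_spoiler_spans; infer_instance

-- ===== CLAIM (what is proved, stated in full; the proofs are below) =====
def Claim_equal_spoiler_spans : Prop := ∀ (text : String), Dom_spoiler_spans text → Spec_spoiler_spans text (spoiler_spans text)

-- ===== LEMMAS AND PROOFS =====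

-- A's loop with fuel f equals: the accumulator followed by pairing B's position
-- list collected with fuel 2*f (A consumes two finds per step, B one).
theorem pvLoopA_eq_pair_positions (s : List Char) :
    ∀ (fuel : Nat) (start : Int) (spans : List (Int × Int)),
      pvLoopA s fuel start spans = spans ++ pvPair (pvPositions s (2 * fuel) start) := by
  intro fuel
  induction fuel with
  | zero => intro start spans; simp [pvLoopA, pvPositions, pvPair]
  | succ n ih =>
    intro start spans
    have h2 : 2 * (n + 1) = (2 * n + 1) + 1 := by omega
    rw [h2]
    show pvLoopA s (n + 1) start spans = _
    rw [pvLoopA, pvPositions]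
    by_cases hl : PySem.Chars.findFrom s ['|', '|'] start none = -1
    · simp [hl, pvPair]
    · simp only [hl, if_false]
      rw [pvPositions]
      by_cases hr : PySem.Chars.findFrom s ['|', '|']
          (PySem.Chars.findFrom s ['|', '|'] start none + 2) none = -1
      · simp [hr, pvPair]
      · simp only [hr, if_false, pvPair]
        rw [ih]
        simp

-- ===== VERDICT (by name: the statement is the Claim_ definition above) =====
theorem spoiler_spans_spec : Claim_equal_spoiler_spans := by
  intro text _
  unfold Spec_spoiler_spans spoiler_spans spoiler_spans_alt
  rw [pvLoopA_eq_pair_positions]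
  simp
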